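-- pv_equiv track=rewrite | github.com/cplyon/leetcode | arrays/find_duplicate.py | findDuplicate2
-- ===== SOURCE A (Python) =====
-- def findDuplicate2(nums: list[int]) -> int:
--     # O(nlogn) time, O(1) space
--     if not nums:
--         return -1
--
--     nums.sort()
--     m = nums[0]
--     for n in nums[1:]:
--         if n == m:
--             return n
--         m = n
--
--     return -1
-- ===== SOURCE B (Python) =====
-- def findDuplicate2(nums: list[int]) -> int:
--     # Single pass with a set; track the minimum value seen twice.
--     # (Unlike A, this does not sort nums in place.)
--     seen = set()
--     best = None
--     for n in nums:
--         if n in seen: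
--             best = n if best is None else min(best, n)
--         else:
--             seen.add(n)
--     return best if best is not None else -1
-- ===== Notes on version B (the rewrite author's own statement) =====
-- stated objective: idiomatic
-- what changed: Replaces in-place sort plus adjacent-pair scan with one hash-set pass that tracks the minimum repeated value (and leaves nums unmutated).
import Mathlib
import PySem

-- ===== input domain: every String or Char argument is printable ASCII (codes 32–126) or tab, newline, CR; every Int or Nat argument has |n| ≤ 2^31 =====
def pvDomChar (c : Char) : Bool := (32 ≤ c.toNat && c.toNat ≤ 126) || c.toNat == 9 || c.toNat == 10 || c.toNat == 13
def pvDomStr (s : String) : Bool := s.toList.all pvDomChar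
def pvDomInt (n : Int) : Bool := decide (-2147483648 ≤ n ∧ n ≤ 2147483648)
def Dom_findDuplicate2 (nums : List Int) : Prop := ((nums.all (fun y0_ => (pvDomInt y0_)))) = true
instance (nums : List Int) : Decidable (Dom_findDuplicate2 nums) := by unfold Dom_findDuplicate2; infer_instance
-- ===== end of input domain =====

-- B replaces A's in-place sort + adjacent-pair scan by a single set pass tracking the minimum
-- repeated value (idiomatic); the RETURN values are proved equal — A also sorts nums in place,
-- a side effect B does not perform.

-- ===== PORT A =====
-- the 'for n in nums[1:]' loop with its early return, carrying m
def pvScanA (m : Int) : List Int → Int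
  | [] => -1
  | n :: rest => if n = m then n else pvScanA n rest

def findDuplicate2 (nums : List Int) : Int :=
  if nums = [] then -1
  else
    match PySem.List.sorted nums (fun x => x) false with
    | [] => -1                                  -- unreachable: sorted of a nonempty list is nonempty
    | m :: rest => pvScanA m rest               -- m = nums[0] after the sort, rest = nums[1:]

-- ===== PORT B =====
-- the 'for n in nums' loop, carrying seen and best
def pvLoopB : List Int → PySem.Set Int → Option Int → Option Int
  | [], _, best => best
  | n :: rest, seen, best =>
    if PySem.Set.contains seen n then
      pvLoopB rest seen (some (match best with | none => n | some b => min b n))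
    else
      pvLoopB rest (PySem.Set.add seen n) best

def findDuplicate2_alt (nums : List Int) : Int :=
  match pvLoopB nums PySem.Set.empty none with
  | some b => b
  | none => -1

-- ===== PRECONDITION & SPEC =====
def Spec_findDuplicate2 (nums : List Int) (out : Int) : Prop := out = findDuplicate2_alt nums
instance (nums : List Int) (out : Int) : Decidable (Spec_findDuplicate2 nums out) := by unfold Spec_findDuplicate2; infer_instance

-- ===== CLAIM (what is proved, stated in full; the proofs are below) =====
def Claim_equal_findDuplicate2 : Prop := ∀ (nums : List Int), Dom_findDuplicate2 nums → Spec_findDuplicate2 nums (findDuplicate2 nums)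

-- ===== LEMMAS AND PROOFS =====

-- characterisation of the common result: -1 on duplicate-free input, else the least repeated value
def MinDup (xs : List Int) (r : Int) : Prop :=
  (r = -1 ∧ xs.Nodup) ∨ (2 ≤ xs.count r ∧ ∀ v, 2 ≤ xs.count v → r ≤ v)

theorem minDup_unique {xs : List Int} {r r' : Int}
    (h : MinDup xs r) (h' : MinDup xs r') : r = r' := by
  rcases h with ⟨hr, hn⟩ | ⟨hc, hm⟩ <;> rcases h' with ⟨hr', hn'⟩ | ⟨hc', hm'⟩
  · omega
  · exact absurd hc' (by have := List.nodup_iff_count_le_one.1 hn r'; omega)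
  · exact absurd hc (by have := List.nodup_iff_count_le_one.1 hn' r; omega)
  · exact le_antisymm (hm _ hc') (hm' _ hc)

theorem minDup_perm {xs ys : List Int} {r : Int} (hp : xs.Perm ys)
    (h : MinDup xs r) : MinDup ys r := by
  rcases h with ⟨hr, hn⟩ | ⟨hc, hm⟩
  · exact Or.inl ⟨hr, hp.nodup_iff.1 hn⟩
  · exact Or.inr ⟨by rwa [← hp.count_eq], fun v hv => hm v (by rwa [hp.count_eq])⟩

-- ---- A side: the adjacent scan on a sorted list finds the least repeated value ----
theorem scanA_minDup : ∀ (rest : List Int) (m : Int),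
    (m :: rest).Pairwise (· ≤ ·) → MinDup (m :: rest) (pvScanA m rest) := by
  intro rest
  induction rest with
  | nil => intro m _; exact Or.inl ⟨rfl, List.nodup_singleton m⟩
  | cons n rest' ih =>
    intro m hpw
    have hmn : m ≤ n := (List.pairwise_cons.1 hpw).1 n (by simp)
    have hall : ∀ x ∈ n :: rest', m ≤ x := (List.pairwise_cons.1 hpw).1
    have hpw' : (n :: rest').Pairwise (· ≤ ·) := (List.pairwise_cons.1 hpw).2
    by_cases hnm : n = m
    · -- duplicate found at the head: it is the minimum of the whole list
      simp only [pvScanA, if_pos hnm]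
      refine Or.inr ⟨by simp [List.count_cons, hnm], fun v hv => ?_⟩
      have hvmem : v ∈ m :: n :: rest' := List.count_pos_iff.1 (by omega)
      rcases List.mem_cons.1 hvmem with rfl | hv'
      · exact hnm ▸ hmn
      · exact le_trans (hnm ▸ hmn) (hall v hv')
    · -- head is strictly smaller than everything after it, hence not repeated
      have hmlt : ∀ x ∈ n :: rest', m < x := by
        intro x hx
        rcases List.mem_cons.1 hx with rfl | hx'
        · exact lt_of_le_of_ne hmn (fun h => hnm h.symm)
        · exact lt_of_lt_of_le (lt_of_le_of_ne hmn (fun h => hnm h.symm))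
            ((List.pairwise_cons.1 hpw').1 x hx')
      have hmnotin : m ∉ n :: rest' := fun h => lt_irrefl m (hmlt m h)
      have hcnt : ∀ v : Int, v ≠ m → (m :: n :: rest').count v = (n :: rest').count v := by
        intro v hv
        simp [List.count_cons, hv, Ne.symm hv]
      simp only [pvScanA, if_neg hnm]
      rcases ih n hpw' with ⟨hr, hn⟩ | ⟨hc, hm⟩
      · exact Or.inl ⟨hr, List.nodup_cons.2 ⟨hmnotin, hn⟩⟩
      · have hrne : pvScanA n rest' ≠ m := by
          intro h
          have : pvScanA n rest' ∈ n :: rest' := List.count_pos_iff.1 (by omega)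
          exact hmnotin (h ▸ this)
        refine Or.inr ⟨by rw [hcnt _ hrne]; exact hc, fun v hv => ?_⟩
        by_cases hvm : v = m
        · exfalso
          subst hvm
          have h0 : (n :: rest').count v = 0 := List.count_eq_zero.2 hmnotin
          have h1 : (v :: n :: rest').count v = 1 := by simp [List.count_cons, h0]
          omega
        · exact hm v (by rw [← hcnt _ hvm]; exact hv)

-- ---- B side: loop invariant — best is the least value repeated in the processed prefix ----
def BestInv (p : List Int) (best : Option Int) : Prop :=
  (best = none ∧ p.Nodup) ∨ ∃ b, best = some b ∧ 2 ≤ p.count b ∧ ∀ v, 2 ≤ p.count v → b ≤ v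

theorem count_append_singleton (p : List Int) (n v : Int) :
    (p ++ [n]).count v = p.count v + (if v = n then 1 else 0) := by
  by_cases h : v = n
  · simp [List.count_append, List.count_cons, h]
  · simp [List.count_append, List.count_cons, h, Ne.symm h]

theorem loopB_inv : ∀ (l : List Int) (seen : PySem.Set Int) (best : Option Int) (p : List Int),
    (∀ v : Int, v ∈ seen ↔ v ∈ p) → BestInv p best →
    BestInv (p ++ l) (pvLoopB l seen best) := by
  intro l
  induction l with
  | nil => intro seen best p _ hb; simpa [pvLoopB] using hb
  | cons n l' ih =>
    intro seen best p hseen hb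
    have hgoal : p ++ n :: l' = (p ++ [n]) ++ l' := by simp
    rw [hgoal]
    by_cases hc : PySem.Set.contains seen n = true
    · -- n already seen: n ∈ p, best becomes min of old best and n
      have hnp : n ∈ p := (hseen n).1 (by simpa [PySem.Set.contains] using hc)
      simp only [pvLoopB, if_pos hc]
      refine ih seen _ (p ++ [n]) (fun v => ?_) ?_
      · rw [hseen v]
        constructor
        · intro h; exact List.mem_append.2 (Or.inl h)
        · intro h; rcases List.mem_append.1 h with h | h
          · exact h
          · simp at h; exact h ▸ hnp
      · rcases hb with ⟨hbn, hnd⟩ | ⟨b, hbs, hbc, hbm⟩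
        · -- first duplicate: best := n
          subst hbn
          have hc1 : p.count n = 1 := by
            have h1 := List.nodup_iff_count_le_one.1 hnd n
            have h2 := List.count_pos_iff.2 hnp
            omega
          refine Or.inr ⟨n, rfl, by rw [count_append_singleton]; simp [hc1], fun v hv => ?_⟩
          rw [count_append_singleton] at hv
          have hle := List.nodup_iff_count_le_one.1 hnd v
          by_cases hvn : v = n
          · omega
          · simp [hvn] at hv; omega
        · -- best := min b n
          subst hbs
          refine Or.inr ⟨min b n, rfl, ?_, fun v hv => ?_⟩
          · rcases le_total b n with h | h
            · rw [min_eq_left h, count_append_singleton]; omega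
            · rw [min_eq_right h, count_append_singleton]
              have := List.count_pos_iff.2 hnp
              simp; omega
          · rw [count_append_singleton] at hv
            by_cases hvn : v = n
            · exact hvn ▸ min_le_right b n
            · simp [hvn] at hv
              exact le_trans (min_le_left b n) (hbm v hv)
    · -- n not seen yet: add it; best and its invariant are unchanged
      have hnp : n ∉ p := fun h => hc (by simpa [PySem.Set.contains] using (hseen n).2 h)
      simp only [pvLoopB, if_neg hc]
      refine ih _ best (p ++ [n]) (fun v => ?_) ?_
      · rw [PySem.Set.mem_add, hseen v]
        simp [List.mem_append]
      · rcases hb with ⟨hbn, hnd⟩ | ⟨b, hbs, hbc, hbm⟩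
        · refine Or.inl ⟨hbn, ?_⟩
          rw [List.nodup_append]
          refine ⟨hnd, List.nodup_singleton n, ?_⟩
          intro a ha b hb
          simp at hb
          subst hb
          exact fun heq => hnp (heq ▸ ha)
        · have hbne : b ≠ n := by
            intro h
            exact hnp (h ▸ List.count_pos_iff.1 (by omega))
          refine Or.inr ⟨b, hbs, by rw [count_append_singleton, if_neg hbne]; omega,
            fun v hv => ?_⟩
          rw [count_append_singleton] at hv
          by_cases hvn : v = n
          · exfalso
            have h0 : p.count v = 0 := List.count_eq_zero.2 (by rw [hvn]; exact hnp)
            rw [if_pos hvn] at hv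
            omega
          · simp [hvn] at hv; exact hbm v hv

theorem altB_minDup (nums : List Int) : MinDup nums (findDuplicate2_alt nums) := by
  have h := loopB_inv nums PySem.Set.empty none []
    (by intro v; simp [PySem.Set.empty]) (Or.inl ⟨rfl, List.nodup_nil⟩)
  simp only [List.nil_append] at h
  unfold findDuplicate2_alt
  rcases h with ⟨hn, hnd⟩ | ⟨b, hbs, hbc, hbm⟩
  · rw [hn]; exact Or.inl ⟨rfl, hnd⟩
  · rw [hbs]; exact Or.inr ⟨hbc, hbm⟩

theorem a_minDup (nums : List Int) : MinDup nums (findDuplicate2 nums) := by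
  unfold findDuplicate2
  by_cases h : nums = []
  · subst h; simp; exact Or.inl ⟨rfl, List.nodup_nil⟩
  · rw [if_neg h]
    rcases hs : PySem.List.sorted nums (fun x => x) false with _ | ⟨m, rest⟩
    · exact absurd ((PySem.List.sorted_eq_nil_iff nums (fun x => x) false).1 hs) h
    · have hpw : (m :: rest).Pairwise (· ≤ ·) := by
        have := PySem.List.sorted_pairwise nums (fun x => x)
        rw [hs] at this
        exact this
      exact minDup_perm (hs ▸ PySem.List.sorted_perm nums (fun x => x) false)
        (scanA_minDup rest m hpw)

-- ===== VERDICT (by name: the statement is the Claim_ definition above) =====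
theorem findDuplicate2_spec : Claim_equal_findDuplicate2 := by
  intro nums _
  exact minDup_unique (a_minDup nums) (altB_minDup nums)
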